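-- pv_equiv track=rewrite | github.com/la-hyunwoo-kim/DMI-UN-Comp | un_comp/functions/source_parse.py | swap_korea_name
-- ===== SOURCE A (Python) =====
-- def swap_korea_name(name):
--     if type(name) is list:
--         out_list = []
--         for name_in in name:
--             name_words = name_in.split(" ")
--             first_word = [name_words[0]]
--             other_word = name_words[1:]
--             out_list.append(" ".join(other_word + first_word))
--         return out_list
--     else:
--         name_words = name.split(" ")
--         first_word = [name_words[0]]
--         other_word = name_words[1:]
--         return " ".join(other_word + first_word)
-- ===== SOURCE B (Python) =====
-- def _rotate(s):
--     head = []
--     tail = []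
--     seen = False
--     for ch in s:
--         if seen:
--             tail.append(ch)
--         elif ch == " ":
--             seen = True
--         else:
--             head.append(ch)
--     if not seen:
--         return s
--     return "".join(tail) + " " + "".join(head)
--
--
-- def swap_korea_name(name):
--     if type(name) is list:
--         return [_rotate(name_in) for name_in in name]
--     return _rotate(name)
-- ===== Notes on version B (the rewrite author's own statement) =====
-- stated objective: alternative
-- what changed: Replaces A's tokenize-rotate-rejoin (split into a word list, slice off the first word, rejoin with spaces) with a single character-level state machine: one pass over the characters with a boolean flag that flips at the first space and routes each character into a head or tail accumulator, never building a word list or slicing.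
import Mathlib
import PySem

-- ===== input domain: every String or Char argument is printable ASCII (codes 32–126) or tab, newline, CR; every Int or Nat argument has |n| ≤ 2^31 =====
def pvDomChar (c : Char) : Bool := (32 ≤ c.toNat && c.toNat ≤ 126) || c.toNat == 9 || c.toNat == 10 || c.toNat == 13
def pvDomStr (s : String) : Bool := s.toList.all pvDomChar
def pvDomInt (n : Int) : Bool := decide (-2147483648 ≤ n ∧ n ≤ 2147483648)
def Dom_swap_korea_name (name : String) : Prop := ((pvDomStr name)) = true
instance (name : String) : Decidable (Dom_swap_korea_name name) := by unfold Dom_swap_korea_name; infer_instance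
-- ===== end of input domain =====

-- B replaces A's tokenize/rotate/rejoin with a single character-level state machine
-- (one pass, a seen-space flag, head/tail accumulators); same cost, no word list.
-- Only the string branch of the Python dispatch is ported (the Lean signature is String → String).

-- ===== PORT A =====
-- Python's split with a one-char separator is PySem.Chars.splitOn (exact for a
-- nonempty separator); split never returns an empty list, so indexing the first
-- word (which never raises in Python) is exactly headI.
def swap_korea_name (name : String) : String :=
  let name_words := PySem.Chars.splitOn name.toList [' ']
  let first_word := [name_words.headI]
  let other_word := PySem.List.slice name_words (some 1) none
  String.ofList (PySem.Chars.join [' '] (other_word ++ first_word))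

-- ===== PORT B =====
-- the for-loop of Source B's _rotate: state = (head, tail, seen); list.append is ++ [ch]
def rotateGo (s : List Char) : List Char × List Char × Bool :=
  s.foldl (fun st ch =>
    let (head, tail, seen) := st
    if seen then (head, tail ++ [ch], seen)
    else if ch = ' ' then (head, tail, true)
    else (head ++ [ch], tail, seen)) ([], [], false)

def swap_korea_name_alt (name : String) : String :=
  let (head, tail, seen) := rotateGo name.toList
  if seen then String.ofList (tail ++ ' ' :: head) else name

-- ===== PRECONDITION & SPEC =====
def Spec_swap_korea_name (name : String) (out : String) : Prop := out = swap_korea_name_alt name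
instance (name : String) (out : String) : Decidable (Spec_swap_korea_name name out) := by unfold Spec_swap_korea_name; infer_instance

-- ===== CLAIM (what is proved, stated in full; the proofs are below) =====
def Claim_equal_swap_korea_name : Prop := ∀ (name : String), Dom_swap_korea_name name → Spec_swap_korea_name name (swap_korea_name name)

-- ===== LEMMAS AND PROOFS =====

-- Reference recursion for splitOn with the single-char separator ' '.
def pvSplit : List Char → List (List Char)
  | [] => [[]]
  | c :: rest =>
      if c = ' ' then [] :: pvSplit rest
      else (c :: (pvSplit rest).headI) :: (pvSplit rest).tail

theorem pvSplit_ne_nil (cs : List Char) : pvSplit cs ≠ [] := by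
  cases cs with
  | nil => simp [pvSplit]
  | cons c rest => simp only [pvSplit]; split <;> simp

theorem pvSplit_cons (cs : List Char) :
    (pvSplit cs).headI :: (pvSplit cs).tail = pvSplit cs := by
  rcases h : pvSplit cs with _ | ⟨a, t⟩
  · exact absurd h (pvSplit_ne_nil cs)
  · rfl

theorem splitOn_go_eq (fuel : Nat) (l cur : List Char) (acc : List (List Char))
    (h : l.length ≤ fuel) :
    PySem.Chars.splitOn.go [' '] fuel l cur acc
      = acc.reverse ++ ((cur.reverse ++ (pvSplit l).headI) :: (pvSplit l).tail) := by
  induction fuel generalizing l cur acc with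
  | zero =>
    have : l = [] := by cases l <;> simp_all
    subst this
    simp [PySem.Chars.splitOn.go, pvSplit]
  | succ fuel ih =>
    cases l with
    | nil => simp [PySem.Chars.splitOn.go, pvSplit]
    | cons c rest =>
      by_cases hc : c = ' '
      · subst hc
        have hpre : [' '].isPrefixOf (' ' :: rest) = true := by simp [List.isPrefixOf]
        rw [show PySem.Chars.splitOn.go [' '] (fuel + 1) (' ' :: rest) cur acc
              = PySem.Chars.splitOn.go [' '] fuel rest [] (cur.reverse :: acc) by
            simp [PySem.Chars.splitOn.go, hpre]]
        rw [ih rest [] (cur.reverse :: acc) (by simpa using Nat.le_of_succ_le_succ h)]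
        simp [pvSplit, pvSplit_cons rest]
      · have hpre : [' '].isPrefixOf (c :: rest) = false := by
          simp [List.isPrefixOf, Ne.symm hc]
        rw [show PySem.Chars.splitOn.go [' '] (fuel + 1) (c :: rest) cur acc
              = PySem.Chars.splitOn.go [' '] fuel rest (c :: cur) acc by
            simp [PySem.Chars.splitOn.go, hpre]]
        rw [ih rest (c :: cur) acc (by simpa using Nat.le_of_succ_le_succ h)]
        simp [pvSplit, hc]

theorem splitOn_eq_pvSplit (cs : List Char) :
    PySem.Chars.splitOn cs [' '] = pvSplit cs := by
  have := splitOn_go_eq (cs.length + 1) cs [] [] (by omega)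
  simpa [PySem.Chars.splitOn, pvSplit_cons cs] using this

theorem intercalate_cons_ne_nil (x : List Char) (l : List (List Char)) (h : l ≠ []) :
    [' '].intercalate (x :: l) = x ++ ' ' :: [' '].intercalate l := by
  cases l with
  | nil => simp at h
  | cons y t => simp [List.intercalate]

theorem join_pvSplit (cs : List Char) : [' '].intercalate (pvSplit cs) = cs := by
  induction cs with
  | nil => simp [pvSplit, List.intercalate]
  | cons c rest ih =>
    by_cases hc : c = ' '
    · subst hc
      rw [pvSplit, if_pos rfl, intercalate_cons_ne_nil _ _ (pvSplit_ne_nil rest)]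
      simp [ih]
    · rw [pvSplit, if_neg hc]
      rcases hp : pvSplit rest with _ | ⟨h₀, t⟩
      · exact absurd hp (pvSplit_ne_nil rest)
      · cases t with
        | nil =>
          simp only [List.headI, List.tail]
          rw [hp] at ih
          simp only [List.intercalate] at ih ⊢
          simp_all
        | cons y t' =>
          simp only [List.headI, List.tail]
          rw [intercalate_cons_ne_nil _ _ (by simp),
              List.cons_append]
          rw [hp] at ih
          rw [intercalate_cons_ne_nil _ _ (by simp)] at ih
          simp [ih]

theorem intercalate_append_singleton (l : List (List Char)) (x : List Char) (h : l ≠ []) :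
    [' '].intercalate (l ++ [x]) = [' '].intercalate l ++ ' ' :: x := by
  induction l with
  | nil => simp at h
  | cons y t ih =>
    cases t with
    | nil => simp [List.intercalate]
    | cons z t' =>
      rw [List.cons_append, intercalate_cons_ne_nil _ _ (by simp),
          intercalate_cons_ne_nil _ _ (by simp), ih (by simp)]
      simp

theorem pvSplit_prefix (pre rest : List Char) (h : ' ' ∉ pre) :
    pvSplit (pre ++ ' ' :: rest) = pre :: pvSplit rest := by
  induction pre with
  | nil => simp [pvSplit]
  | cons c p ih =>
    have hc : c ≠ ' ' := fun hc => h (by simp [hc])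
    rw [List.cons_append, pvSplit, if_neg hc, ih (fun hm => h (by simp [hm]))]
    simp

theorem pvSplit_no_space (cs : List Char) (h : ' ' ∉ cs) : pvSplit cs = [cs] := by
  induction cs with
  | nil => rfl
  | cons c rest ih =>
    have hc : c ≠ ' ' := fun hc => h (by simp [hc])
    rw [pvSplit, if_neg hc, ih (fun hm => h (by simp [hm]))]
    simp

-- B-side characterisation of the fold
theorem rotateGo_seen (cs : List Char) (h t : List Char) :
    cs.foldl (fun st ch =>
      let (head, tail, seen) := st
      if seen then (head, tail ++ [ch], seen)
      else if ch = ' ' then (head, tail, true)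
      else (head ++ [ch], tail, seen)) (h, t, true) = (h, t ++ cs, true) := by
  induction cs generalizing t with
  | nil => simp
  | cons c rest ih => simp [ih]

theorem rotateGo_no_space (cs : List Char) (h t : List Char) (hn : ' ' ∉ cs) :
    cs.foldl (fun st ch =>
      let (head, tail, seen) := st
      if seen then (head, tail ++ [ch], seen)
      else if ch = ' ' then (head, tail, true)
      else (head ++ [ch], tail, seen)) (h, t, false) = (h ++ cs, t, false) := by
  induction cs generalizing h with
  | nil => simp
  | cons c rest ih =>
    have hc : c ≠ ' ' := fun hc => hn (by simp [hc])
    simp only [List.foldl_cons, if_neg hc, Bool.false_eq_true, if_false]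
    rw [ih (h ++ [c]) (fun hm => hn (by simp [hm]))]
    simp

theorem rotateGo_split (pre rest : List Char) (hn : ' ' ∉ pre) :
    rotateGo (pre ++ ' ' :: rest) = (pre, rest, true) := by
  unfold rotateGo
  rw [List.foldl_append, rotateGo_no_space pre [] [] hn]
  simp only [List.foldl_cons, Bool.false_eq_true, if_false]
  simpa using rotateGo_seen rest pre []

theorem exists_first_space (cs : List Char) (h : ' ' ∈ cs) :
    ∃ pre rest, cs = pre ++ ' ' :: rest ∧ ' ' ∉ pre := by
  induction cs with
  | nil => simp at h
  | cons c rest ih =>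
    by_cases hc : c = ' '
    · exact ⟨[], rest, by simp [hc], by simp⟩
    · have h1 : ' ' ∈ rest := by
        rcases List.mem_cons.mp h with h1 | h1
        · exact absurd h1.symm hc
        · exact h1
      rcases ih h1 with ⟨p, r, hpr, hnp⟩
      exact ⟨c :: p, r, by simp [hpr], by simp [Ne.symm hc, hnp]⟩

-- ===== VERDICT (by name: the statement is the Claim_ definition above) =====
theorem swap_korea_name_spec : Claim_equal_swap_korea_name := by
  intro name _
  unfold Spec_swap_korea_name swap_korea_name swap_korea_name_alt
  simp only [splitOn_eq_pvSplit]
  by_cases hm : ' ' ∈ name.toList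
  · rcases exists_first_space name.toList hm with ⟨pre, rest, hd, hn⟩
    rw [hd, rotateGo_split pre rest hn, pvSplit_prefix pre rest hn]
    have hslice : PySem.List.slice (pre :: pvSplit rest) (some 1) none = pvSplit rest := by
      rw [PySem.List.slice_from _ (by norm_num : (0:Int) ≤ 1)]; simp
    rw [hslice]
    simp only [List.headI, PySem.Chars.join, if_true]
    rw [intercalate_append_singleton _ _ (pvSplit_ne_nil _), join_pvSplit]
  · have hrot : rotateGo name.toList = (name.toList, [], false) := by
      unfold rotateGo
      simpa using rotateGo_no_space name.toList [] [] hm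
    rw [hrot, pvSplit_no_space _ hm,
        PySem.List.slice_from ([name.toList]) (by norm_num : (0:Int) ≤ 1)]
    simp [PySem.Chars.join, List.intercalate, String.ofList_toList]
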